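-- pv_equiv track=rewrite | github.com/redbull123/WebApplicationPython | package/analyzeFile.py | enumPair
-- ===== SOURCE A (Python) =====
-- def enumPair(outPut,keyWord,keyWord2,num):
-- 	outCC = "@"
-- 	aux = ""
-- 	proc = "0"
-- 	aux2 = ""
-- 	for line in outPut.split("@"):
-- 		for word in line.split():
-- 			if aux == keyWord:
-- 				if word != "=":
-- 					aux = "."
-- 					if word == num:
-- 						proc = "1"
-- 			elif proc == "1":
-- 				if aux2 == keyWord2:
-- 					if word != "=":
-- 						outCC = outCC + word + "@"
-- 						proc = "0"
-- 						aux2 = "."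
-- 				elif word == keyWord2:
-- 					aux2 = word
-- 			elif word == keyWord:
-- 				aux = word
-- 	return outCC
-- ===== SOURCE B (Python) =====
-- def _skip_eq(toks, i):
--     n = len(toks)
--     while i < n and toks[i] == "=":
--         i += 1
--     return i
--
--
-- def enumPair(outPut, keyWord, keyWord2, num):
--     toks = [w for part in outPut.split("@") for w in part.split()]
--     n = len(toks)
--     res = "@"
--     i = 0
--     while True:
--         try:
--             i = toks.index(keyWord, i)      # first keyword occurrence (C-level scan)
--         except ValueError:
--             break
--         j = _skip_eq(toks, i + 1)           # skip a run of '=' tokens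
--         if j >= n:
--             break
--         if toks[j] != num:                  # value token is consumed either way
--             i = j + 1
--             continue
--         try:
--             k = toks.index(keyWord2, j + 1) # second keyword; keyWord is NOT re-examined here
--         except ValueError:
--             break
--         m = _skip_eq(toks, k + 1)
--         if m >= n:
--             break
--         res += toks[m] + "@"                # capture, then resume the outer scan
--         i = m + 1
--     return res
-- ===== Notes on version B (the rewrite author's own statement) =====
-- stated objective: alternative
-- what changed: A threads every token through a four-string-variable state machine nested over split('@') lines; B flattens the input to one token list and walks it with an explicit jumping index (find keyWord, skip the '=' run, test the value token, find keyWord2, skip '=', capture), so no per-token state variables exist.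
-- outside the precondition, e.g. on enumPair('5 b x', '', 'b', '5'): A returns '@x@', B returns '@'; on enumPair('. . b k x 5', '.', 'k', '.'): A returns '@', B returns '@x@'; on enumPair('k 5 x', 'k', '', '5'): A returns '@x@', B returns '@'
import Mathlib
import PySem

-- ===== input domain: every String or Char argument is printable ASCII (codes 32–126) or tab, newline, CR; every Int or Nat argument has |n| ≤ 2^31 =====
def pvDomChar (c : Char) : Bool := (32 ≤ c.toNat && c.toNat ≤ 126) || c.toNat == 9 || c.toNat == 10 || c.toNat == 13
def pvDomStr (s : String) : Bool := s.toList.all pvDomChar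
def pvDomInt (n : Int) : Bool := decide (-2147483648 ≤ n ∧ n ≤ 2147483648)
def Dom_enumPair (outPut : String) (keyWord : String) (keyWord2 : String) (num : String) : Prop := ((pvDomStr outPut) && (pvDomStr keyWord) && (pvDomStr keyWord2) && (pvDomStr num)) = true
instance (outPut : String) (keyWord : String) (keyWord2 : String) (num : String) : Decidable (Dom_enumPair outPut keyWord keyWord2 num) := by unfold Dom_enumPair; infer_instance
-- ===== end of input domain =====

-- B replaces A's four-string-variable per-token state machine by an index-jumping scan over one
-- flattened token list (find keyWord, skip '=' run, test the value, find keyWord2, skip '=' run,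
-- capture); same result, same cost class (objective: alternative decomposition).

-- ===== PORT A =====
-- one iteration of A's inner loop; st = (outCC, aux, proc, aux2)
def pvStepA (keyWord : String) (keyWord2 : String) (num : String)
    (st : String × String × String × String) (word : String) :
    String × String × String × String :=
  if st.2.1 = keyWord then
    if word ≠ "=" then (st.1, ".", if word = num then "1" else st.2.2.1, st.2.2.2) else st
  else if st.2.2.1 = "1" then
    if st.2.2.2 = keyWord2 then
      if word ≠ "=" then (st.1 ++ word ++ "@", st.2.1, "0", ".") else st
    else if word = keyWord2 then (st.1, st.2.1, st.2.2.1, word) else st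
  else if word = keyWord then (st.1, word, st.2.2.1, st.2.2.2) else st

def enumPair (outPut : String) (keyWord : String) (keyWord2 : String) (num : String) : String :=
  -- outPut.split("@"): split? is none only for sep = "", so `.getD []` is exact for the literal "@"
  (((PySem.Str.split? outPut "@").getD []).foldl
      (fun st line => (PySem.Str.split₀ line).foldl (pvStepA keyWord keyWord2 num) st)
      ("@", "", "0", "")).1

-- ===== PORT B =====
-- hand port of Python's toks.index(t, i) (exact for 0 ≤ i; ValueError ↦ returning toks.length)
def pvFindTok (toks : List String) (t : String) (i : Nat) : Nat :=
  if _h : i < toks.length then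
    if toks.getD i "" = t then i else pvFindTok toks t (i + 1)
  else i
termination_by toks.length - i

-- Source B's _skip_eq: while i < n and toks[i] == "=": i += 1
def pvSkipEq (toks : List String) (i : Nat) : Nat :=
  if _h : i < toks.length then
    if toks.getD i "" = "=" then pvSkipEq toks (i + 1) else i
  else i
termination_by toks.length - i

-- the two bounds the main loop's termination needs (cited by pvScanB's decreasing_by)
theorem pvFindTok_le (toks : List String) (t : String) (i : Nat) : i ≤ pvFindTok toks t i := by
  rw [pvFindTok]
  split
  · split
    · exact le_refl i
    · have := pvFindTok_le toks t (i + 1); omega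
  · exact le_refl i
termination_by toks.length - i

theorem pvSkipEq_le (toks : List String) (i : Nat) : i ≤ pvSkipEq toks i := by
  rw [pvSkipEq]
  split
  · split
    · have := pvSkipEq_le toks (i + 1); omega
    · exact le_refl i
  · exact le_refl i
termination_by toks.length - i

-- Source B's main `while True` loop, with index i; helper-call structure as in Source B
def pvScanB (toks : List String) (keyWord : String) (keyWord2 : String) (num : String)
    (i : Nat) (res : String) : String :=
  let p := pvFindTok toks keyWord i
  if _hp : p < toks.length then
    let j := pvSkipEq toks (p + 1)
    if _hj : j < toks.length then
      if toks.getD j "" ≠ num then pvScanB toks keyWord keyWord2 num (j + 1) res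
      else
        let k := pvFindTok toks keyWord2 (j + 1)
        if _hk : k < toks.length then
          let m := pvSkipEq toks (k + 1)
          if _hm : m < toks.length then
            pvScanB toks keyWord keyWord2 num (m + 1) (res ++ toks.getD m "" ++ "@")
          else res
        else res
    else res
  else res
termination_by toks.length - i
decreasing_by
  · have h1 := pvFindTok_le toks keyWord i
    have h2 := pvSkipEq_le toks (pvFindTok toks keyWord i + 1)
    omega
  · have h1 := pvFindTok_le toks keyWord i
    have h2 := pvSkipEq_le toks (pvFindTok toks keyWord i + 1)
    have h3 := pvFindTok_le toks keyWord2 (pvSkipEq toks (pvFindTok toks keyWord i + 1) + 1)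
    have h4 := pvSkipEq_le toks (pvFindTok toks keyWord2 (pvSkipEq toks (pvFindTok toks keyWord i + 1) + 1) + 1)
    omega

def enumPair_alt (outPut : String) (keyWord : String) (keyWord2 : String) (num : String) : String :=
  pvScanB (((PySem.Str.split? outPut "@").getD []).flatMap PySem.Str.split₀)
    keyWord keyWord2 num 0 "@"

-- ===== PRECONDITION & SPEC =====
-- Pre_ excludes keyWord or keyWord2 equal to "" or "." — degenerate keyword arguments that collide
-- with A's internal sentinel values (aux/aux2 start at "" and are set to "." after a consumed token),
-- a corner on which neither A's accidental matches nor B's plain no-match is the specified behaviour.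
def Pre_enumPair (outPut : String) (keyWord : String) (keyWord2 : String) (num : String) : Prop :=
  keyWord ≠ "" ∧ keyWord ≠ "." ∧ keyWord2 ≠ "" ∧ keyWord2 ≠ "."
instance (outPut : String) (keyWord : String) (keyWord2 : String) (num : String) : Decidable (Pre_enumPair outPut keyWord keyWord2 num) := by unfold Pre_enumPair; infer_instance

def pvWitness_enumPair : String × String × String × String := ("key = 7 stuff sec = x", "key", "sec", "7")

def Spec_enumPair (outPut : String) (keyWord : String) (keyWord2 : String) (num : String) (out : String) : Prop := out = enumPair_alt outPut keyWord keyWord2 num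
instance (outPut : String) (keyWord : String) (keyWord2 : String) (num : String) (out : String) : Decidable (Spec_enumPair outPut keyWord keyWord2 num out) := by unfold Spec_enumPair; infer_instance

-- ===== CLAIM (what is proved, stated in full; the proofs are below) =====
def Claim_equal_enumPair : Prop := ∀ (outPut : String) (keyWord : String) (keyWord2 : String) (num : String), Dom_enumPair outPut keyWord keyWord2 num → Pre_enumPair outPut keyWord keyWord2 num → Spec_enumPair outPut keyWord keyWord2 num (enumPair outPut keyWord keyWord2 num)

-- ===== LEMMAS AND PROOFS =====

-- one-step unfolding facts for the two helper scans
theorem pvFindTok_ge (toks : List String) (t : String) (i : Nat) (h : toks.length ≤ i) :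
    pvFindTok toks t i = i := by
  rw [pvFindTok, dif_neg (Nat.not_lt.mpr h)]

theorem pvFindTok_hit (toks : List String) (t : String) (i : Nat) (h : i < toks.length)
    (he : toks.getD i "" = t) : pvFindTok toks t i = i := by
  rw [pvFindTok, dif_pos h, if_pos he]

theorem pvFindTok_miss (toks : List String) (t : String) (i : Nat) (h : i < toks.length)
    (hne : toks.getD i "" ≠ t) : pvFindTok toks t i = pvFindTok toks t (i + 1) := by
  rw [pvFindTok, dif_pos h, if_neg hne]

theorem pvSkipEq_ge (toks : List String) (i : Nat) (h : toks.length ≤ i) :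
    pvSkipEq toks i = i := by
  rw [pvSkipEq, dif_neg (Nat.not_lt.mpr h)]

theorem pvSkipEq_stop (toks : List String) (i : Nat) (h : i < toks.length)
    (hne : toks.getD i "" ≠ "=") : pvSkipEq toks i = i := by
  rw [pvSkipEq, dif_pos h, if_neg hne]

theorem pvSkipEq_step (toks : List String) (i : Nat) (h : i < toks.length)
    (he : toks.getD i "" = "=") : pvSkipEq toks i = pvSkipEq toks (i + 1) := by
  rw [pvSkipEq, dif_pos h, if_pos he]

-- the three mid-iteration continuations of pvScanB's loop body (proof-only views of the body)
def pvContC (toks : List String) (kw : String) (kw2 : String) (num : String) (i : Nat) (res : String) : String :=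
  if pvSkipEq toks i < toks.length then
    pvScanB toks kw kw2 num (pvSkipEq toks i + 1) (res ++ toks.getD (pvSkipEq toks i) "" ++ "@")
  else res

def pvContB (toks : List String) (kw : String) (kw2 : String) (num : String) (i : Nat) (res : String) : String :=
  if pvFindTok toks kw2 i < toks.length then
    pvContC toks kw kw2 num (pvFindTok toks kw2 i + 1) res
  else res

def pvContA (toks : List String) (kw : String) (kw2 : String) (num : String) (i : Nat) (res : String) : String :=
  if pvSkipEq toks i < toks.length then
    (if toks.getD (pvSkipEq toks i) "" ≠ num then pvScanB toks kw kw2 num (pvSkipEq toks i + 1) res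
     else pvContB toks kw kw2 num (pvSkipEq toks i + 1) res)
  else res

theorem pvScanB_eq (toks : List String) (kw : String) (kw2 : String) (num : String) (i : Nat) (res : String) :
    pvScanB toks kw kw2 num i res =
      if pvFindTok toks kw i < toks.length then pvContA toks kw kw2 num (pvFindTok toks kw i + 1) res
      else res := by
  rw [pvScanB]
  simp only [pvContA, pvContB, pvContC]
  split
  · split
    · split
      · rfl
      · split
        · split <;> rfl
        · rfl
    · rfl
  · rfl

-- the invariant: A's fold from each reachable state equals the matching point of B's scan
theorem pvMain (toks : List String) (kw : String) (kw2 : String) (num : String)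
    (hkw1 : kw ≠ "") (hkw2 : kw ≠ ".") (hk21 : kw2 ≠ "") (hk22 : kw2 ≠ ".") :
    ∀ (d i : Nat), toks.length - i ≤ d →
      ((∀ res aux aux2, (aux = "" ∨ aux = ".") → (aux2 = "" ∨ aux2 = ".") →
          (List.foldl (pvStepA kw kw2 num) (res, aux, "0", aux2) (toks.drop i)).1
            = pvScanB toks kw kw2 num i res)
       ∧ (∀ res aux2, (aux2 = "" ∨ aux2 = ".") →
          (List.foldl (pvStepA kw kw2 num) (res, kw, "0", aux2) (toks.drop i)).1
            = pvContA toks kw kw2 num i res)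
       ∧ (∀ res aux2, (aux2 = "" ∨ aux2 = ".") →
          (List.foldl (pvStepA kw kw2 num) (res, ".", "1", aux2) (toks.drop i)).1
            = pvContB toks kw kw2 num i res)
       ∧ (∀ res,
          (List.foldl (pvStepA kw kw2 num) (res, ".", "1", kw2) (toks.drop i)).1
            = pvContC toks kw kw2 num i res)) := by
  intro d
  induction d with
  | zero =>
    intro i hi
    have hge : toks.length ≤ i := by omega
    have hdrop : toks.drop i = [] := List.drop_eq_nil_of_le hge
    have hs := pvSkipEq_ge toks i hge
    have hf1 := pvFindTok_ge toks kw i hge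
    have hf2 := pvFindTok_ge toks kw2 i hge
    refine ⟨?_, ?_, ?_, ?_⟩ <;> intros <;>
      simp [hdrop, pvScanB_eq, pvContA, pvContB, pvContC, hs, hf1, hf2, Nat.not_lt.mpr hge]
  | succ d ih =>
    intro i hi
    by_cases h : i < toks.length
    case neg =>
      have hge : toks.length ≤ i := by omega
      have hdrop : toks.drop i = [] := List.drop_eq_nil_of_le hge
      have hs := pvSkipEq_ge toks i hge
      have hf1 := pvFindTok_ge toks kw i hge
      have hf2 := pvFindTok_ge toks kw2 i hge
      refine ⟨?_, ?_, ?_, ?_⟩ <;> intros <;>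
        simp [hdrop, pvScanB_eq, pvContA, pvContB, pvContC, hs, hf1, hf2, Nat.not_lt.mpr hge]
    case pos =>
      have hdrop : toks.drop i = toks[i] :: toks.drop (i + 1) := List.drop_eq_getElem_cons h
      have hgetD : toks.getD i "" = toks[i] := List.getD_eq_getElem toks "" h
      obtain ⟨ih0, ih1, ih2, ih3⟩ := ih (i + 1) (by omega)
      refine ⟨?_, ?_, ?_, ?_⟩
      · -- idle state: aux ∈ {"", "."}, proc = "0"
        intro res aux aux2 ha ha2
        have hane : ¬ (aux = kw) := by
          rcases ha with h' | h' <;> subst h' <;> exact fun he => by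
            first
              | exact hkw1 he.symm
              | exact hkw2 he.symm
        rw [hdrop, List.foldl_cons]
        by_cases hw : toks[i] = kw
        · have hstep : pvStepA kw kw2 num (res, aux, "0", aux2) toks[i]
              = (res, kw, "0", aux2) := by simp [pvStepA, hane, hw]
          rw [hstep, ih1 res aux2 ha2, pvScanB_eq,
            pvFindTok_hit toks kw i h (hgetD.trans hw), if_pos h]
        · have hstep : pvStepA kw kw2 num (res, aux, "0", aux2) toks[i]
              = (res, aux, "0", aux2) := by simp [pvStepA, hane, hw]
          rw [hstep, ih0 res aux aux2 ha ha2, pvScanB_eq, pvScanB_eq,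
            pvFindTok_miss toks kw i h (by rw [hgetD]; exact hw)]
      · -- armed state: aux = kw, proc = "0"
        intro res aux2 ha2
        rw [hdrop, List.foldl_cons]
        by_cases hw : toks[i] = "="
        · have hstep : pvStepA kw kw2 num (res, kw, "0", aux2) toks[i]
              = (res, kw, "0", aux2) := by simp [pvStepA, hw]
          rw [hstep, ih1 res aux2 ha2]
          simp only [pvContA]
          rw [pvSkipEq_step toks i h (hgetD.trans hw)]
        · have hj : pvSkipEq toks i = i := pvSkipEq_stop toks i h (by rw [hgetD]; exact hw)
          by_cases hn : toks[i] = num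
          · have hstep : pvStepA kw kw2 num (res, kw, "0", aux2) toks[i]
                = (res, ".", "1", aux2) := by
              simp only [pvStepA]
              rw [if_pos trivial, if_pos hw, if_pos hn]
            rw [hstep, ih2 res aux2 ha2]
            simp only [pvContA]
            rw [hj, if_pos h, if_neg (by rw [hgetD]; simp [hn])]
          · have hstep : pvStepA kw kw2 num (res, kw, "0", aux2) toks[i]
                = (res, ".", "0", aux2) := by
              simp only [pvStepA]
              rw [if_pos trivial, if_pos hw, if_neg hn]
            rw [hstep, ih0 res "." aux2 (Or.inr rfl) ha2]
            simp only [pvContA]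
            rw [hj, if_pos h, if_pos (by rw [hgetD]; exact hn)]
      · -- seeking keyWord2: aux = ".", proc = "1", aux2 ∈ {"", "."}
        intro res aux2 ha2
        have hane : ¬ (("." : String) = kw) := fun he => hkw2 he.symm
        have ha2ne : ¬ (aux2 = kw2) := by
          rcases ha2 with h' | h' <;> subst h' <;> exact fun he => by
            first
              | exact hk21 he.symm
              | exact hk22 he.symm
        rw [hdrop, List.foldl_cons]
        by_cases hw : toks[i] = kw2
        · have hstep : pvStepA kw kw2 num (res, ".", "1", aux2) toks[i]
              = (res, ".", "1", kw2) := by simp [pvStepA, hane, ha2ne, hw]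
          rw [hstep, ih3 res]
          simp only [pvContB]
          rw [pvFindTok_hit toks kw2 i h (hgetD.trans hw), if_pos h]
        · have hstep : pvStepA kw kw2 num (res, ".", "1", aux2) toks[i]
              = (res, ".", "1", aux2) := by simp [pvStepA, hane, ha2ne, hw]
          rw [hstep, ih2 res aux2 ha2]
          simp only [pvContB]
          rw [pvFindTok_miss toks kw2 i h (by rw [hgetD]; exact hw)]
      · -- capturing: aux = ".", proc = "1", aux2 = kw2
        intro res
        have hane : ¬ (("." : String) = kw) := fun he => hkw2 he.symm
        rw [hdrop, List.foldl_cons]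
        by_cases hw : toks[i] = "="
        · have hstep : pvStepA kw kw2 num (res, ".", "1", kw2) toks[i]
              = (res, ".", "1", kw2) := by simp [pvStepA, hane, hw]
          rw [hstep, ih3 res]
          simp only [pvContC]
          rw [pvSkipEq_step toks i h (hgetD.trans hw)]
        · have hstep : pvStepA kw kw2 num (res, ".", "1", kw2) toks[i]
              = (res ++ toks[i] ++ "@", ".", "0", ".") := by simp [pvStepA, hane, hw]
          rw [hstep, ih0 (res ++ toks[i] ++ "@") "." "." (Or.inr rfl) (Or.inr rfl)]
          simp only [pvContC]
          rw [pvSkipEq_stop toks i h (by rw [hgetD]; exact hw), if_pos h, hgetD]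

-- ===== VERDICT (by name: the statement is the Claim_ definition above) =====
theorem enumPair_spec : Claim_equal_enumPair := by
  intro outPut keyWord keyWord2 num _hdom hpre
  obtain ⟨h1, h2, h3, h4⟩ := hpre
  show enumPair outPut keyWord keyWord2 num = enumPair_alt outPut keyWord keyWord2 num
  unfold enumPair enumPair_alt
  rw [← List.foldl_flatMap]
  have := (pvMain (((PySem.Str.split? outPut "@").getD []).flatMap PySem.Str.split₀)
      keyWord keyWord2 num h1 h2 h3 h4
      (((PySem.Str.split? outPut "@").getD []).flatMap PySem.Str.split₀).length 0
      (by omega)).1 "@" "" "" (Or.inl rfl) (Or.inl rfl)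
  simpa using this
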